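-- pv_equiv track=rewrite | github.com/pypi-data/pypi-mirror-53 | packages/unicity/unicity-0.5-py3-none-any.whl/unicity/winnowing.py | fingerprints
-- ===== SOURCE A (Python) =====
-- from operator import itemgetter
--
-- def fingerprints(arr, winSize = 4):
--     arrLen = len(arr)
--     prevMin = 0
--     currMin = 0
--     n = arrLen - winSize
--     windows = [None]*n
--     fingerprintList = []
--     for i in range(n):
--         win = arr[i: i + winSize]  #forming windows
--         windows[i] = win
--         currMin = i + min(enumerate(win), key=itemgetter(1))[0]
--         if not currMin == prevMin:  #min value of window is stored only if it is not the same as min value of prev window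
--             fingerprintList.append(arr[currMin])  #reduces the number of fingerprints while maintaining guarantee
--             prevMin = currMin  #refer to density of winnowing and guarantee threshold (Stanford paper)
--
--     return fingerprintList
-- ===== SOURCE B (Python) =====
-- def fingerprints(arr, winSize = 4):
--     # O(n) monotonic-queue sliding-window minimum (leftmost min via strict pops)
--     n = len(arr) - winSize
--     fingerprintList = []
--     prevMin = 0
--     idx = []      # candidate indices, values non-decreasing; idx[head:] is the live queue
--     head = 0
--     k = 0         # next index of arr to feed into the queue
--     for i in range(n):
--         while k < i + winSize:
--             v = arr[k]
--             while len(idx) > head and arr[idx[-1]] > v: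
--                 idx.pop()
--             idx.append(k)
--             k += 1
--         while idx[head] < i:
--             head += 1
--         currMin = idx[head]
--         if currMin != prevMin:
--             fingerprintList.append(arr[currMin])
--             prevMin = currMin
--     return fingerprintList
-- ===== Notes on version B (the rewrite author's own statement) =====
-- stated objective: faster
-- what changed: Replaced the per-window rescan (slicing each window and taking min(enumerate(...)) over it) by a single-pass monotonic queue of candidate indices, so each index is pushed and popped at most once; the windows list, which A builds but never uses, is dropped.
import Mathlib
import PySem

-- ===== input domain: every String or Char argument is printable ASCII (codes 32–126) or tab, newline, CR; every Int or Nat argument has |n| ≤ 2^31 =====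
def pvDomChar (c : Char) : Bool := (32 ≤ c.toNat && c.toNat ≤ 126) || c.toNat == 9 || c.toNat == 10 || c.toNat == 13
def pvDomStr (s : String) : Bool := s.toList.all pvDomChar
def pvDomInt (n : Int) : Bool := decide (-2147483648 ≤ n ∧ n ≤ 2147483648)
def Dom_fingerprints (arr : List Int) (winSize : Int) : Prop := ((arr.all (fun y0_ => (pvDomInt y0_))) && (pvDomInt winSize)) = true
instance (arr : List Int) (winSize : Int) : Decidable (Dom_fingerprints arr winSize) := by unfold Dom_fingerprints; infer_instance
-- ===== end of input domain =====

-- B replaces A's per-window rescan by a one-pass monotonic queue of candidate indices (O(n) instead of O(n*winSize)).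

-- ===== PORT A =====
def stepA (arr : List Int) (winSize : Int)
    (st : List (Option (List Int)) × List Int × Int) (i : Int) :
    List (Option (List Int)) × List Int × Int :=
  let win := PySem.List.slice arr (some i) (some (i + winSize))
  let windows := st.1.set i.toNat (some win)
  let currMin : Int :=
    i + ((PySem.List.min? (PySem.List.enumerate win 0) (fun p => p.2)).getD (0, 0)).1
  if currMin ≠ st.2.2 then (windows, st.2.1 ++ [PySem.List.pyGetD arr currMin 0], currMin)
  else (windows, st.2.1, st.2.2)

def fingerprints (arr : List Int) (winSize : Int) : List Int :=
  let arrLen : Int := (arr.length : Int)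
  let n : Int := arrLen - winSize
  ((PySem.List.pyRange 0 n).foldl (stepA arr winSize)
    (List.replicate n.toNat none, [], 0)).2.1

-- ===== PORT B =====
structure BSt where
  idx : List Int
  head : Nat
  k : Int
  prev : Int
  out : List Int

-- inner `while len(idx) > head and arr[idx[-1]] > v: idx.pop()`
def popLoop (arr : List Int) (head : Nat) (v : Int) (idx : List Int) : List Int :=
  if _h : idx.length > head ∧ PySem.List.pyGetD arr (PySem.List.pyGetD idx (-1) 0) 0 > v then
    popLoop arr head v idx.dropLast
  else idx
termination_by idx.length
decreasing_by
  rcases idx with _ | _ <;> simp_all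

-- `while k < i + winSize: v = arr[k]; <popLoop>; idx.append(k); k += 1`
def pushLoop (arr : List Int) (head : Nat) (stop : Int) (idx : List Int) (k : Int) :
    List Int × Int :=
  if h : k < stop then
    let v := PySem.List.pyGetD arr k 0
    pushLoop arr head stop (popLoop arr head v idx ++ [k]) (k + 1)
  else (idx, k)
termination_by (stop - k).toNat
decreasing_by omega

-- `while idx[head] < i: head += 1`  (the `head < len` guard only makes the recursion total;
--  on every input admitted by Pre_ the queue is never exhausted here)
def headLoop (idx : List Int) (i : Int) (head : Nat) : Nat :=
  if h : head < idx.length ∧ PySem.List.pyGetD idx (head : Int) 0 < i then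
    headLoop idx i (head + 1)
  else head
termination_by idx.length - head
decreasing_by omega

def stepB (arr : List Int) (winSize : Int) (st : BSt) (i : Int) : BSt :=
  let pk := pushLoop arr st.head (i + winSize) st.idx st.k
  let head := headLoop pk.1 i st.head
  let currMin := PySem.List.pyGetD pk.1 (head : Int) 0
  if currMin ≠ st.prev then
    ⟨pk.1, head, pk.2, currMin, st.out ++ [PySem.List.pyGetD arr currMin 0]⟩
  else ⟨pk.1, head, pk.2, st.prev, st.out⟩

def fingerprints_alt (arr : List Int) (winSize : Int) : List Int :=
  let n : Int := (arr.length : Int) - winSize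
  ((PySem.List.pyRange 0 n).foldl (stepB arr winSize) ⟨[], 0, 0, 0, []⟩).out

-- ===== PRECONDITION & SPEC =====
-- Pre_ excludes exactly the inputs where the Python A raises: winSize ≤ 0 while
-- len(arr) - winSize > 0 makes every window slice empty, so min() gets an empty
-- sequence and raises ValueError (B's queue is empty there and raises IndexError).
def Pre_fingerprints (arr : List Int) (winSize : Int) : Prop :=
  1 ≤ winSize ∨ (arr.length : Int) ≤ winSize

instance (arr : List Int) (winSize : Int) : Decidable (Pre_fingerprints arr winSize) := by
  unfold Pre_fingerprints; infer_instance

def pvWitness_fingerprints : List Int × Int := ([1, 3, 2, 4, 0, 5], 3)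

def Spec_fingerprints (arr : List Int) (winSize : Int) (out : List Int) : Prop :=
  out = fingerprints_alt arr winSize

instance (arr : List Int) (winSize : Int) (out : List Int) :
    Decidable (Spec_fingerprints arr winSize out) := by
  unfold Spec_fingerprints; infer_instance

-- ===== CLAIM =====
def Claim_equal_fingerprints : Prop :=
  ∀ (arr : List Int) (winSize : Int), Dom_fingerprints arr winSize →
    Pre_fingerprints arr winSize →
    Spec_fingerprints arr winSize (fingerprints arr winSize)

-- ===== LEMMAS AND PROOFS =====

-- arr[j] for an in-range Nat index, as both ports read it
def gel (arr : List Int) (j : Nat) : Int := arr.getD j 0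

-- j is a suffix-minimum position w.r.t. the fed prefix [0, k): no later fed value is smaller
abbrev SufMin (arr : List Int) (j k : Nat) : Prop :=
  ∀ j', j' < k → j < j' → gel arr j ≤ gel arr j'

-- the live queue contents: suffix-minimum positions in [lo, k), in increasing order
def cand (arr : List Int) (lo k : Nat) : List Int :=
  ((List.range' lo (k - lo)).filter (fun j => decide (SufMin arr j k))).map
    (fun j : Nat => (j : Int))

-- m is the leftmost minimum position of the window [lo, k)
def LMin (arr : List Int) (lo k m : Nat) : Prop :=
  lo ≤ m ∧ m < k ∧ (∀ j, lo ≤ j → j < k → gel arr m ≤ gel arr j) ∧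
    (∀ j, lo ≤ j → j < m → gel arr m < gel arr j)

theorem LMin_unique {arr : List Int} {lo k m m' : Nat}
    (h : LMin arr lo k m) (h' : LMin arr lo k m') : m = m' := by
  obtain ⟨hlo, hk, hmin, hleft⟩ := h
  obtain ⟨hlo', hk', hmin', hleft'⟩ := h'
  rcases lt_trichotomy m m' with hlt | heq | hgt
  · exact absurd (hmin m' hlo' hk') (not_le.mpr (hleft' m hlo hlt))
  · exact heq
  · exact absurd (hmin' m hlo hk) (not_le.mpr (hleft m' hlo' hgt))

-- existence of a leftmost minimum
theorem LMin_exists (arr : List Int) (lo k : Nat) (hlk : lo < k) :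
    ∃ m, LMin arr lo k m := by
  obtain ⟨d, rfl⟩ : ∃ d, k = lo + d + 1 := ⟨k - lo - 1, by omega⟩
  clear hlk
  induction d with
  | zero =>
    exact ⟨lo, le_rfl, by omega, fun j h1 h2 => by
      have : j = lo := by omega
      simp [this], fun j h1 h2 => by omega⟩
  | succ d ih =>
    obtain ⟨m, hlo, hk, hmin, hleft⟩ := ih
    by_cases hc : gel arr m ≤ gel arr (lo + d + 1)
    · refine ⟨m, hlo, by omega, fun j h1 h2 => ?_, hleft⟩
      rcases Nat.lt_or_ge j (lo + d + 1) with hj | hj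
      · exact hmin j h1 hj
      · have : j = lo + d + 1 := by omega
        simpa [this] using hc
    · rw [not_le] at hc
      refine ⟨lo + d + 1, by omega, by omega, fun j h1 h2 => ?_, fun j h1 h2 => ?_⟩
      · rcases Nat.lt_or_ge j (lo + d + 1) with hj | hj
        · exact le_of_lt (lt_of_lt_of_le hc (hmin j h1 hj))
        · have : j = lo + d + 1 := by omega
          simp [this]
      · exact lt_of_lt_of_le hc (hmin j h1 h2)

-- the queue's values are non-decreasing along the queue
theorem cand_pairwise (arr : List Int) (lo k : Nat) :
    (cand arr lo k).Pairwise (fun a b => gel arr a.toNat ≤ gel arr b.toNat) := by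
  unfold cand
  rw [List.pairwise_map]
  have hlt : ((List.range' lo (k - lo)).filter
      (fun j => decide (SufMin arr j k))).Pairwise (· < ·) :=
    List.Pairwise.sublist List.filter_sublist (List.pairwise_lt_range' ..)
  refine List.Pairwise.imp_of_mem (fun {a b} ha hb hab => ?_) hlt
  have hsa : SufMin arr a k := by simpa using (List.of_mem_filter ha)
  have hbk : b < k := by
    have := List.mem_range'_1.mp (List.mem_of_mem_filter hb)
    omega
  simpa using hsa b hbk hab

theorem cand_mem (arr : List Int) (lo k : Nat) {x : Int} (hx : x ∈ cand arr lo k) :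
    ∃ j : Nat, x = (j : Nat) ∧ lo ≤ j ∧ j < k ∧ SufMin arr j k := by
  simp only [cand, List.mem_map, List.mem_filter, List.mem_range'_1,
    decide_eq_true_eq] at hx
  obtain ⟨j, ⟨⟨h1, h2⟩, h3⟩, rfl⟩ := hx
  exact ⟨j, rfl, by omega, by omega, h3⟩

-- feeding index k: the suffix-minimum positions of [lo, k+1)
theorem cand_succ (arr : List Int) (lo k : Nat) (hlk : lo ≤ k) :
    cand arr lo (k + 1)
      = (cand arr lo k).filter (fun j => decide (gel arr j.toNat ≤ gel arr k)) ++ [(k : Int)] := by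
  unfold cand
  have hr : List.range' lo (k + 1 - lo) = List.range' lo (k - lo) ++ [k] := by
    have h1 : k + 1 - lo = (k - lo) + 1 := by omega
    have h2 : lo + 1 * (k - lo) = k := by omega
    rw [h1, List.range'_concat, h2]
  have hk1 : SufMin arr k (k + 1) := fun j' h1 h2 => by omega
  rw [List.filter_map, List.filter_filter, hr, List.filter_append, List.map_append]
  congr 1
  · congr 1
    apply List.filter_congr
    intro j hj
    have hjk : j < k := by have := List.mem_range'_1.mp hj; omega
    have hiff : SufMin arr j (k + 1) ↔ (gel arr j ≤ gel arr k ∧ SufMin arr j k) := by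
      constructor
      · intro h
        exact ⟨h k (by omega) hjk, fun j' h1 h2 => h j' (by omega) h2⟩
      · rintro ⟨h2, h1⟩ j' hj1 hj2
        rcases Nat.lt_or_ge j' k with hc | hc
        · exact h1 j' hc hj2
        · have hk' : j' = k := by omega
          subst hk'
          exact h2
    by_cases h1 : gel arr j ≤ gel arr k <;> by_cases h2 : SufMin arr j k <;>
      simp [Function.comp, hiff, h1, h2]
  · simp
    exact hk1

theorem pyGetD_neg_one_concat (l : List Int) (a : Int) :
    PySem.List.pyGetD (l ++ [a]) (-1) 0 = a := by
  simp [PySem.List.pyGetD, PySem.List.pyGet?, PySem.List.pyIdx?]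

theorem getD_append_head (l1 : List Int) (r : Int) (l2 : List Int) :
    (l1 ++ r :: l2).getD l1.length 0 = r := by
  rw [List.getD_eq_getElem?_getD, List.getElem?_append_right le_rfl]
  simp

-- popLoop pops exactly the tail entries with value > v
theorem popLoop_spec (arr : List Int) (v : Int) (stale active : List Int)
    (hmono : active.Pairwise (fun a b => gel arr a.toNat ≤ gel arr b.toNat))
    (hnn : ∀ x ∈ active, 0 ≤ x) :
    popLoop arr stale.length v (stale ++ active)
      = stale ++ active.filter (fun j => decide (gel arr j.toNat ≤ v)) := by
  induction active using List.reverseRecOn with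
  | nil =>
    rw [popLoop]
    simp
  | append_singleton as a ih =>
    obtain ⟨hpw, hpa, hle⟩ := List.pairwise_append.mp hmono
    have hlea : ∀ x ∈ as, gel arr x.toNat ≤ gel arr a.toNat := by
      intro x hx
      exact hle x hx a (by simp)
    rw [popLoop]
    have hlen : (stale ++ (as ++ [a])).length > stale.length := by simp
    have hlast : PySem.List.pyGetD (stale ++ (as ++ [a])) (-1) 0 = a := by
      rw [← List.append_assoc]
      exact pyGetD_neg_one_concat _ _
    by_cases hc : gel arr a.toNat > v
    · have hcond : (stale ++ (as ++ [a])).length > stale.length ∧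
          PySem.List.pyGetD arr (PySem.List.pyGetD (stale ++ (as ++ [a])) (-1) 0) 0 > v := by
        refine ⟨hlen, ?_⟩
        rw [hlast]
        obtain ⟨na, hna⟩ := Int.eq_ofNat_of_zero_le (hnn a (by simp))
        subst hna
        rw [PySem.List.pyGetD_natCast]
        simpa [gel] using hc
      rw [dif_pos hcond]
      have hdrop : (stale ++ (as ++ [a])).dropLast = stale ++ as := by
        rw [← List.append_assoc, List.dropLast_concat]
      rw [hdrop, ih hpw (fun x hx => hnn x (by simp [hx]))]
      have hfa : List.filter (fun j => decide (gel arr j.toNat ≤ v)) [a] = [] := by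
        simp [not_le.mpr hc]
      rw [List.filter_append, hfa, List.append_nil]
    · rw [not_lt] at hc
      have hcond : ¬((stale ++ (as ++ [a])).length > stale.length ∧
          PySem.List.pyGetD arr (PySem.List.pyGetD (stale ++ (as ++ [a])) (-1) 0) 0 > v) := by
        rintro ⟨-, hgt⟩
        rw [hlast] at hgt
        obtain ⟨na, hna⟩ := Int.eq_ofNat_of_zero_le (hnn a (by simp))
        subst hna
        rw [PySem.List.pyGetD_natCast] at hgt
        exact absurd hgt (not_lt.mpr (by simpa [gel] using hc))
      rw [dif_neg hcond]
      have hfas : List.filter (fun j => decide (gel arr j.toNat ≤ v)) as = as :=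
        List.filter_eq_self.mpr (fun x hx => by
          simpa using le_trans (hlea x hx) hc)
      rw [List.filter_append, hfas]
      simp [hc]

theorem pushLoop_spec (arr : List Int) (stale : List Int) (lo : Nat) :
    ∀ (count k : Nat), lo ≤ k → k + count ≤ arr.length →
    pushLoop arr stale.length ((k + count : Nat) : Int) (stale ++ cand arr lo k) (k : Int)
      = (stale ++ cand arr lo (k + count), ((k + count : Nat) : Int)) := by
  intro count
  induction count with
  | zero =>
    intro k hlk hbound
    rw [pushLoop]
    simp
  | succ count ih =>
    intro k hlk hbound
    rw [pushLoop]
    rw [dif_pos (by exact_mod_cast (by omega : (k : Int) < ((k + (count + 1) : Nat) : Int)))]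
    have hv : PySem.List.pyGetD arr (k : Int) 0 = gel arr k := by
      rw [PySem.List.pyGetD_natCast]
      rfl
    have hpop : popLoop arr stale.length (PySem.List.pyGetD arr (k : Int) 0)
        (stale ++ cand arr lo k)
        = stale ++ (cand arr lo k).filter (fun j => decide (gel arr j.toNat ≤ gel arr k)) := by
      rw [hv]
      exact popLoop_spec arr _ stale _ (cand_pairwise arr lo k)
        (fun x hx => by obtain ⟨j, rfl, -, -, -⟩ := cand_mem arr lo k hx; positivity)
    have hstep : popLoop arr stale.length (PySem.List.pyGetD arr (k : Int) 0)
        (stale ++ cand arr lo k) ++ [(k : Int)] = stale ++ cand arr lo (k + 1) := by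
      rw [hpop, cand_succ arr lo k hlk, List.append_assoc]
    simp only [hstep]
    have hcast : (k : Int) + 1 = ((k + 1 : Nat) : Int) := by push_cast; ring
    have harg : ((k + (count + 1) : Nat) : Int) = (((k + 1) + count : Nat) : Int) := by
      push_cast; ring
    rw [hcast, harg, ih (k + 1) (by omega) (by omega)]
    have : (k + 1) + count = k + (count + 1) := by omega
    rw [this]

-- splitting the queue at window start t
theorem cand_split (arr : List Int) (lo t k : Nat) (h1 : lo ≤ t) (h2 : t ≤ k) :
    ∃ part, cand arr lo k = part ++ cand arr t k ∧ ∀ x ∈ part, x < (t : Int) := by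
  refine ⟨((List.range' lo (t - lo)).filter (fun j => decide (SufMin arr j k))).map
    (fun j : Nat => (j : Int)), ?_, ?_⟩
  · unfold cand
    have hr : List.range' lo (k - lo) = List.range' lo (t - lo) ++ List.range' t (k - t) := by
      have h3 := List.range'_append (s := lo) (m := t - lo) (n := k - t) (step := 1)
      have h4 : lo + 1 * (t - lo) = t := by omega
      have h5 : t - lo + (k - t) = k - lo := by omega
      rw [h4, h5] at h3
      exact h3.symm
    rw [hr, List.filter_append, List.map_append]
  · intro x hx
    simp only [List.mem_map, List.mem_filter, List.mem_range'_1] at hx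
    obtain ⟨j, ⟨⟨-, hj⟩, -⟩, rfl⟩ := hx
    exact_mod_cast (by omega : j < t)

theorem headLoop_spec (idx : List Int) (t : Nat) :
    ∀ (part stale rest : List Int),
    idx = stale ++ (part ++ rest) → (∀ x ∈ part, x < (t : Int)) →
    (∀ x ∈ rest, (t : Int) ≤ x) → rest ≠ [] →
    headLoop idx (t : Int) stale.length = (stale ++ part).length := by
  intro part
  induction part with
  | nil =>
    intro stale rest h hpart hrest hne
    obtain ⟨r, rest', rfl⟩ := List.exists_cons_of_ne_nil hne
    rw [headLoop]
    have hget : PySem.List.pyGetD idx ((stale.length : Nat) : Int) 0 = r := by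
      rw [PySem.List.pyGetD_natCast, h]
      simp
    rw [dif_neg]
    · simp
    · rintro ⟨-, hlt⟩
      rw [hget] at hlt
      exact absurd hlt (not_lt.mpr (hrest r (by simp)))
  | cons x part' ih =>
    intro stale rest h hpart hrest hne
    rw [headLoop]
    have hget : PySem.List.pyGetD idx ((stale.length : Nat) : Int) 0 = x := by
      rw [PySem.List.pyGetD_natCast, h]
      simp
    rw [dif_pos]
    · have hre : idx = (stale ++ [x]) ++ (part' ++ rest) := by
        rw [h]; simp
      have := ih (stale ++ [x]) rest hre (fun y hy => hpart y (by simp [hy])) hrest hne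
      rw [show stale.length + 1 = (stale ++ [x]).length by simp] at *
      rw [this]
      simp
    · constructor
      · rw [h]
        simp only [List.length_append, List.length_cons]
        omega
      · rw [hget]
        exact hpart x (by simp)

-- the head of the live queue is the leftmost minimum of the window
theorem cand_head (arr : List Int) (lo k m : Nat) (hm : LMin arr lo k m) :
    ∃ rest, cand arr lo k = (m : Int) :: rest := by
  obtain ⟨hlo, hk, hmin, hleft⟩ := hm
  unfold cand
  have hr : List.range' lo (k - lo) = List.range' lo (m - lo) ++ List.range' m (k - m) := by
    have h3 := List.range'_append (s := lo) (m := m - lo) (n := k - m) (step := 1)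
    have h4 : lo + 1 * (m - lo) = m := by omega
    have h5 : m - lo + (k - m) = k - lo := by omega
    rw [h4, h5] at h3
    exact h3.symm
  have hr2 : List.range' m (k - m) = m :: List.range' (m + 1) (k - m - 1) := by
    have h6 : k - m = (k - m - 1) + 1 := by omega
    rw [h6, List.range'_succ]
    simp
  have hf1 : List.filter (fun j => decide (SufMin arr j k)) (List.range' lo (m - lo)) = [] := by
    rw [List.filter_eq_nil_iff]
    intro j hj
    have hjb := List.mem_range'_1.mp hj
    simp only [decide_eq_true_eq]
    intro hsm
    exact absurd (hsm m hk (by omega)) (not_le.mpr (hleft j (by omega) (by omega)))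
  have hsm : SufMin arr m k := fun j' h1 h2 => hmin j' (by omega) h1
  refine ⟨((List.range' (m + 1) (k - m - 1)).filter
    (fun j => decide (SufMin arr j k))).map (fun j : Nat => (j : Int)), ?_⟩
  rw [hr, List.filter_append, hf1, List.nil_append, hr2, List.filter_cons]
  rw [if_pos (by simpa using hsm)]
  simp

-- PySem.List.min? is a left fold keeping the current best on ties: auxiliary decomposition
theorem min?_fold_aux {α : Type} (key : α → Int) :
    ∀ (xs : List α) (a m : α),
    xs.foldl (fun acc x => match acc with
      | none => some x
      | some m0 => if key x < key m0 then some x else some m0) (some a) = some m →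
    (m = a ∧ ∀ y ∈ xs, key a ≤ key y) ∨
    (∃ l1 l2, xs = l1 ++ m :: l2 ∧ key m < key a ∧ (∀ y ∈ l1, key m < key y) ∧
      (∀ y ∈ l2, key m ≤ key y)) := by
  intro xs
  induction xs with
  | nil =>
    intro a m h
    simp at h
    exact Or.inl ⟨h.symm, by simp⟩
  | cons x xs ih =>
    intro a m h
    rw [List.foldl_cons] at h
    by_cases hx : key x < key a
    · rw [show (match some a with
          | none => some x
          | some m0 => if key x < key m0 then some x else some m0) = some x by simp [hx]] at h
      rcases ih x m h with ⟨rfl, hall⟩ | ⟨l1, l2, rfl, hlt, hl1, hl2⟩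
      · exact Or.inr ⟨[], xs, rfl, hx, by simp, hall⟩
      · exact Or.inr ⟨x :: l1, l2, rfl, lt_trans hlt hx, by
          intro y hy
          rcases List.mem_cons.mp hy with rfl | hy
          · exact hlt
          · exact hl1 y hy, hl2⟩
    · rw [show (match some a with
          | none => some x
          | some m0 => if key x < key m0 then some x else some m0) = some a by simp [hx]] at h
      rcases ih a m h with ⟨rfl, hall⟩ | ⟨l1, l2, rfl, hlt, hl1, hl2⟩
      · refine Or.inl ⟨rfl, ?_⟩
        intro y hy
        rcases List.mem_cons.mp hy with rfl | hy
        · exact not_lt.mp hx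
        · exact hall y hy
      · refine Or.inr ⟨x :: l1, l2, rfl, hlt, ?_, hl2⟩
        intro y hy
        rcases List.mem_cons.mp hy with rfl | hy
        · exact lt_of_lt_of_le hlt (not_lt.mp hx)
        · exact hl1 y hy

-- PySem.List.min? returns the FIRST extremal element: decomposition lemma
theorem min?_first {α : Type} (key : α → Int) (xs : List α) (m : α)
    (h : PySem.List.min? xs key = some m) :
    ∃ l1 l2, xs = l1 ++ m :: l2 ∧ (∀ y ∈ l1, key m < key y) ∧
      (∀ y ∈ l2, key m ≤ key y) := by
  rcases xs with _ | ⟨x, t⟩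
  · simp [PySem.List.min?] at h
  · unfold PySem.List.min? at h
    rw [List.foldl_cons] at h
    rcases min?_fold_aux key t x m h with ⟨rfl, hall⟩ | ⟨l1, l2, rfl, hlt, hl1, hl2⟩
    · exact ⟨[], t, rfl, by simp, hall⟩
    · exact ⟨x :: l1, l2, rfl, by
        intro y hy
        rcases List.mem_cons.mp hy with rfl | hy
        · exact hlt
        · exact hl1 y hy, hl2⟩

-- A's per-window computation: min(enumerate(win), key=itemgetter(1))[0] picks the
-- leftmost-minimum offset of the window
theorem stepA_curr (arr : List Int) (lo k m : Nat) (hk : k ≤ arr.length)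
    (hm : LMin arr lo k m) :
    ((PySem.List.min? (PySem.List.enumerate ((arr.drop lo).take (k - lo)) 0)
        (fun p => p.2)).getD (0, 0)).1 = ((m - lo : Nat) : Int) := by
  obtain ⟨hlo, hkm, hmin, hleft⟩ := hm
  set win := (arr.drop lo).take (k - lo) with hwin
  have hlol : lo ≤ arr.length := by omega
  have hwl : win.length = k - lo := by
    simp [hwin]
    omega
  have hwget : ∀ j (hj : j < k - lo), win[j]'(by omega) = gel arr (lo + j) := by
    intro j hj
    have hj2 : lo + j < arr.length := by omega
    simp only [hwin, List.getElem_take, List.getElem_drop]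
    simp [gel, List.getD_eq_getElem?_getD, List.getElem?_eq_getElem hj2]
  have hel : (PySem.List.enumerate win 0).length = k - lo := by
    rw [PySem.List.length_enumerate, hwl]
  obtain ⟨p, hp⟩ : ∃ p, PySem.List.min? (PySem.List.enumerate win 0) (fun p => p.2) = some p := by
    rcases ho : PySem.List.min? (PySem.List.enumerate win 0) (fun p => p.2) with _ | p
    · rw [PySem.List.min?_eq_none_iff] at ho
      have := congrArg List.length ho
      rw [hel] at this
      simp at this
      omega
    · exact ⟨p, rfl⟩
  obtain ⟨l1, l2, hdecomp, hl1, hl2⟩ := min?_first _ _ _ hp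
  set q := l1.length with hq
  have hql : q < k - lo := by
    have := congrArg List.length hdecomp
    rw [hel] at this
    simp [hq] at this ⊢
    omega
  have henum? : ∀ (j : Nat), j < k - lo →
      (PySem.List.enumerate win)[j]? = some ((j : Int), win.getD j 0) := by
    intro j hj
    have hjlen : j < (PySem.List.enumerate win).length := by omega
    rw [List.getElem?_eq_getElem hjlen, PySem.List.getElem_enumerate]
    have hjw : j < win.length := by omega
    simp [List.getD_eq_getElem?_getD, List.getElem?_eq_getElem hjw]
  have hpq : p = ((q : Int), win.getD q 0) := by
    have h1 : (PySem.List.enumerate win)[q]? = some p := by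
      rw [hdecomp, List.getElem?_append_right le_rfl]
      simp
    rw [henum? q hql] at h1
    exact (Option.some_inj.mp h1).symm
  have hlen2 : (PySem.List.enumerate win).length = l1.length + (l2.length + 1) := by
    rw [hdecomp]
    simp
  have hbefore : ∀ j, j < q → win.getD q 0 < win.getD j 0 := by
    intro j hj
    have h1 : (PySem.List.enumerate win)[j]? = l1[j]? := by
      rw [hdecomp, List.getElem?_append_left (by omega)]
    rw [henum? j (by omega), List.getElem?_eq_getElem (by omega : j < l1.length)] at h1
    have hmem : ((j : Int), win.getD j 0) ∈ l1 := by
      rw [Option.some_inj.mp h1]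
      exact List.getElem_mem _
    have := hl1 _ hmem
    rw [hpq] at this
    simpa using this
  have hafter : ∀ j, q < j → j < k - lo → win.getD q 0 ≤ win.getD j 0 := by
    intro j hj1 hj2
    have h1 : (PySem.List.enumerate win)[j]? = l2[j - q - 1]? := by
      rw [hdecomp, List.getElem?_append_right (by omega)]
      have hjq : j - l1.length = (j - q - 1) + 1 := by omega
      rw [hjq]
      simp
    rw [henum? j hj2, List.getElem?_eq_getElem (show j - q - 1 < l2.length by omega)] at h1
    have hmem : ((j : Int), win.getD j 0) ∈ l2 := by
      rw [Option.some_inj.mp h1]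
      exact List.getElem_mem _
    have := hl2 _ hmem
    rw [hpq] at this
    simpa using this
  have hwgetD : ∀ j, j < k - lo → win.getD j 0 = gel arr (lo + j) := by
    intro j hj
    have hjw : j < win.length := by omega
    rw [List.getD_eq_getElem?_getD, List.getElem?_eq_getElem hjw]
    simpa using hwget j hj
  have hlm : LMin arr lo k (lo + q) := by
    refine ⟨by omega, by omega, ?_, ?_⟩
    · intro j h1 h2
      obtain ⟨d, rfl⟩ : ∃ d, j = lo + d := ⟨j - lo, by omega⟩
      have hd : d < k - lo := by omega
      rw [← hwgetD d hd, ← hwgetD q hql]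
      rcases lt_trichotomy d q with hc | hc | hc
      · exact le_of_lt (hbefore d hc)
      · rw [hc]
      · exact hafter d hc hd
    · intro j h1 h2
      obtain ⟨d, rfl⟩ : ∃ d, j = lo + d := ⟨j - lo, by omega⟩
      rw [← hwgetD d (by omega), ← hwgetD q hql]
      exact hbefore d (by omega)
  have hmq : m = lo + q := LMin_unique ⟨hlo, hkm, hmin, hleft⟩ hlm
  rw [hp]
  simp only [Option.getD_some, hpq]
  congr 1
  omega

theorem main_invariant (arr : List Int) (w' : Nat) (hw : 1 ≤ w') (N : Nat)
    (hN : N + w' = arr.length) :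
    ∀ t, t ≤ N →
    ∃ (prev : Int) (out : List Int) (stale : List Int)
      (windows : List (Option (List Int))),
      (((List.range t).map (fun j : Nat => (j : Int))).foldl (stepA arr (w' : Int))
          (List.replicate N none, [], 0)) = (windows, out, prev) ∧
      (((List.range t).map (fun j : Nat => (j : Int))).foldl (stepB arr (w' : Int))
          ⟨[], 0, 0, 0, []⟩)
        = ⟨stale ++ cand arr (t - 1) (if t = 0 then 0 else t - 1 + w'),
            stale.length, (((if t = 0 then 0 else t - 1 + w' : Nat)) : Int), prev, out⟩ := by
  intro t
  induction t with
  | zero =>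
    intro _
    refine ⟨0, [], [], List.replicate N none, by simp, ?_⟩
    simp [cand]
  | succ t ih =>
    intro ht
    obtain ⟨prev, out, stale, windows, hA, hB⟩ := ih (by omega)
    have hbound : t + w' ≤ arr.length := by omega
    -- the pushed-up-to index before this iteration
    set K : Nat := if t = 0 then 0 else t - 1 + w' with hK
    have hKle : t - 1 ≤ K := by
      by_cases h0 : t = 0 <;> simp [hK, h0]
    have hKle2 : K ≤ t + w' := by
      by_cases h0 : t = 0 <;> simp [hK, h0]
    -- push step
    have hpush : pushLoop arr stale.length ((t : Int) + (w' : Int))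
        (stale ++ cand arr (t - 1) K) (K : Int)
        = (stale ++ cand arr (t - 1) (t + w'), ((t + w' : Nat) : Int)) := by
      have h1 := pushLoop_spec arr stale (t - 1) (t + w' - K) K hKle (by omega)
      have h2 : K + (t + w' - K) = t + w' := by omega
      rw [h2] at h1
      have h3 : ((t + w' : Nat) : Int) = (t : Int) + (w' : Int) := by push_cast; ring
      rw [h3] at h1
      exact h1
    -- the leftmost minimum of this window
    obtain ⟨m, hm⟩ := LMin_exists arr t (t + w') (by omega)
    obtain ⟨part, hsplit, hpartlt⟩ := cand_split arr (t - 1) t (t + w') (by omega) (by omega)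
    obtain ⟨rest, hrest⟩ := cand_head arr t (t + w') m hm
    have hhead : headLoop (stale ++ cand arr (t - 1) (t + w')) (t : Int) stale.length
        = (stale ++ part).length := by
      refine headLoop_spec _ t part stale (cand arr t (t + w')) (by rw [hsplit]) hpartlt ?_ ?_
      · intro x hx
        obtain ⟨j, rfl, hj1, -, -⟩ := cand_mem _ _ _ hx
        exact_mod_cast hj1
      · rw [hrest]
        simp
    have hcm : PySem.List.pyGetD (stale ++ cand arr (t - 1) (t + w'))
        (((stale ++ part).length : Nat) : Int) 0 = (m : Int) := by
      rw [PySem.List.pyGetD_natCast, hsplit, hrest, ← List.append_assoc]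
      exact getD_append_head (stale ++ part) _ _
    -- A's window and current minimum
    have hslice : PySem.List.slice arr (some (t : Int)) (some ((t : Int) + (w' : Int)))
        = (arr.drop t).take ((t + w') - t) := by
      have h3 : (t : Int) + (w' : Int) = ((t + w' : Nat) : Int) := by push_cast; ring
      rw [h3, PySem.List.slice_natCast]
    have hcurA : (t : Int) + ((PySem.List.min?
        (PySem.List.enumerate ((arr.drop t).take ((t + w') - t)) 0)
        (fun p => p.2)).getD (0, 0)).1 = (m : Int) := by
      rw [stepA_curr arr t (t + w') m (by omega) hm]
      have := hm.1
      omega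
    -- one step of A
    have hstepA : stepA arr (w' : Int) (windows, out, prev) (t : Int)
        = (windows.set (t : Int).toNat
            (some (PySem.List.slice arr (some (t : Int)) (some ((t : Int) + (w' : Int))))),
           if (m : Int) ≠ prev then out ++ [PySem.List.pyGetD arr (m : Int) 0] else out,
           if (m : Int) ≠ prev then (m : Int) else prev) := by
      show (if ((t : Int) + _ ≠ _) then _ else _) = _
      rw [show ((t : Int) + ((PySem.List.min? (PySem.List.enumerate
        (PySem.List.slice arr (some (t : Int)) (some ((t : Int) + (w' : Int)))) 0)
        (fun p => p.2)).getD (0, 0)).1) = (m : Int) by rw [hslice]; exact hcurA]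
      split_ifs <;> rfl
    -- one step of B
    have hstepB : stepB arr (w' : Int)
        ⟨stale ++ cand arr (t - 1) K, stale.length, (K : Int), prev, out⟩ (t : Int)
        = ⟨(stale ++ part) ++ cand arr t (t + w'), (stale ++ part).length,
            ((t + w' : Nat) : Int),
            if (m : Int) ≠ prev then (m : Int) else prev,
            if (m : Int) ≠ prev then out ++ [PySem.List.pyGetD arr (m : Int) 0] else out⟩ := by
      show (if _ then _ else _) = _
      rw [show (pushLoop arr stale.length ((t : Int) + (w' : Int))
            (stale ++ cand arr (t - 1) K) (K : Int)) = (stale ++ cand arr (t - 1) (t + w'),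
            ((t + w' : Nat) : Int)) from hpush]
      rw [hhead, hcm, hsplit, ← List.append_assoc]
      split_ifs <;> rfl
    refine ⟨if (m : Int) ≠ prev then (m : Int) else prev,
            if (m : Int) ≠ prev then out ++ [PySem.List.pyGetD arr (m : Int) 0] else out,
            stale ++ part,
            windows.set (t : Int).toNat
              (some (PySem.List.slice arr (some (t : Int)) (some ((t : Int) + (w' : Int))))),
            ?_, ?_⟩
    · rw [List.range_succ, List.map_append, List.foldl_append, hA]
      simp only [List.map_cons, List.map_nil, List.foldl_cons, List.foldl_nil]
      exact hstepA
    · rw [List.range_succ, List.map_append, List.foldl_append, hB]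
      simp only [List.map_cons, List.map_nil, List.foldl_cons, List.foldl_nil]
      rw [hstepB]
      simp only [Nat.succ_ne_zero, if_false, Nat.add_sub_cancel]

-- ===== VERDICT =====
theorem fingerprints_spec : Claim_equal_fingerprints := by
  unfold Claim_equal_fingerprints
  intro arr winSize hdom hpre
  unfold Spec_fingerprints
  simp only [fingerprints, fingerprints_alt]
  by_cases hn : (arr.length : Int) - winSize ≤ 0
  · have hr : PySem.List.pyRange 0 ((arr.length : Int) - winSize) = [] := by
      rw [PySem.List.pyRange_of_pos _ _ one_pos, if_neg (by omega)]
      simp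
    rw [hr]
    simp
  · rw [not_le] at hn
    have hw : 1 ≤ winSize := by
      rcases hpre with h | h
      · exact h
      · omega
    set N : Nat := ((arr.length : Int) - winSize).toNat with hNdef
    set w' : Nat := winSize.toNat with hwdef
    have hwq : winSize = (w' : Int) := by omega
    have hnq : (arr.length : Int) - winSize = (N : Int) := by omega
    have hNw : N + w' = arr.length := by omega
    rw [hnq, hwq, PySem.List.pyRange_zero_natCast]
    obtain ⟨prev, out, stale, windows, hA, hB⟩ :=
      main_invariant arr w' (by omega) N hNw N le_rfl
    rw [hA, hB]
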